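-- pv_equiv track=rewrite | github.com/CodelineAtyab/genz-todo-list-app | seq_converter_solution_one_of_many.py | convert_seq_to_numbers
-- ===== SOURCE A (Python) =====
-- def convert_seq_to_numbers(inc_seq: str):
--     """
--     Converts a sequence of characters to a list of numbers, eliminating z, which is a continuation character.
--     :param inc_seq: A sequence of characters in the form of a string.
--     :return: A list of integers.
--     """
--     result_number_list = []
--     z_zone = False
--     z_zone_sum = 0
--     for char in inc_seq:
--         offset_val = 97 if char != "_" else 96  # Offset based on ASCII mapping. To start from 0 in case of 'a'.
--         number_repr = ord(char) - offset_val + 1    # Since our representation is 1 for 'a' so we add 1.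
--
--         # Set z zone if any z is encountered and calculate sum until we get a non-z character
--         if char == "z":
--             z_zone = True
--             z_zone_sum += number_repr
--         else:
--             z_zone = False
--
--         if not z_zone:
--             # If we are out of the z zone, then put the current non z char value in sum and skip to the next char
--             if z_zone_sum > 0:
--                 z_zone_sum += number_repr
--                 result_number_list.append(z_zone_sum)
--                 z_zone_sum = 0
--
--             # This is the normal case where there is no z around.
--             else:
--                 result_number_list.append(number_repr)
--
--     return result_number_list
-- ===== SOURCE B (Python) =====
-- import re
--
-- def convert_seq_to_numbers(inc_seq: str):
--     """Tokenize into maximal z*[^z] groups; each group is 26 per 'z' plus the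
--     terminator's value ('_' -> 0, else ord(c)-96). A trailing run of z's has
--     no terminator and is dropped by the regex."""
--     return [26 * (len(g) - 1) + (0 if g[-1] == "_" else ord(g[-1]) - 96)
--             for g in re.findall(r"z*[^z]", inc_seq)]
-- ===== Notes on version B (the rewrite author's own statement) =====
-- stated objective: idiomatic
-- what changed: Replaced the stateful flush-on-transition accumulator (z_zone flag + running sum) by a regex tokenization into maximal z*[^z] groups followed by a direct per-group formula 26*zcount + value(terminator).
import Mathlib
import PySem

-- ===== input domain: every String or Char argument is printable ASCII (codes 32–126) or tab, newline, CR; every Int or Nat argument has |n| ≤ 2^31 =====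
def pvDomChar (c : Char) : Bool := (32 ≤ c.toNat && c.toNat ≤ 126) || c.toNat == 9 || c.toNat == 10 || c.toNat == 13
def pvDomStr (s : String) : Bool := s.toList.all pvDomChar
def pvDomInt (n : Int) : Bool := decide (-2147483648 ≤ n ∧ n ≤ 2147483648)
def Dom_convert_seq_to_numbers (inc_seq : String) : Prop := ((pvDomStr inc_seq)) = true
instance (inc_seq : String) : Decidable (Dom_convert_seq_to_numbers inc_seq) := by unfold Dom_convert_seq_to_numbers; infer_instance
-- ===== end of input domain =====

-- B tokenizes the string into maximal z*[^z] groups and maps a closed formula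
-- over them, instead of A's flush-on-transition accumulator (objective: idiomatic).

-- ===== PORT A =====
-- state: (result_number_list, z_zone, z_zone_sum)
def pvStepA (st : List Int × Bool × Int) (c : Char) : List Int × Bool × Int :=
  let offset : Int := if c ≠ '_' then 97 else 96
  let number_repr : Int := (c.toNat : Int) - offset + 1
  if c = 'z' then (st.1, true, st.2.2 + number_repr)
  else
    if st.2.2 > 0 then (st.1 ++ [st.2.2 + number_repr], false, 0)
    else (st.1 ++ [number_repr], false, 0)

def convert_seq_to_numbers (inc_seq : String) : List Int :=
  (inc_seq.toList.foldl pvStepA ([], false, 0)).1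

-- ===== PORT B =====
-- tokenizer: maximal groups of k 'z's followed by one non-'z' terminator;
-- a trailing run of z's is unmatched and dropped (as re.findall does).
def pvTokB : List Char → Nat → List (Nat × Char)
  | [], _ => []
  | c :: rest, k => if c = 'z' then pvTokB rest (k + 1) else (k, c) :: pvTokB rest 0

def pvValB (c : Char) : Int := if c = '_' then 0 else (c.toNat : Int) - 96

def convert_seq_to_numbers_alt (inc_seq : String) : List Int :=
  (pvTokB inc_seq.toList 0).map (fun g => 26 * (g.1 : Int) + pvValB g.2)

-- ===== PRECONDITION & SPEC =====
def Spec_convert_seq_to_numbers (inc_seq : String) (out : List Int) : Prop := out = convert_seq_to_numbers_alt inc_seq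
instance (inc_seq : String) (out : List Int) : Decidable (Spec_convert_seq_to_numbers inc_seq out) := by unfold Spec_convert_seq_to_numbers; infer_instance

-- ===== CLAIM (what is proved, stated in full; the proofs are below) =====
def Claim_equal_convert_seq_to_numbers : Prop := ∀ (inc_seq : String), Dom_convert_seq_to_numbers inc_seq → Spec_convert_seq_to_numbers inc_seq (convert_seq_to_numbers inc_seq)

-- ===== LEMMAS AND PROOFS =====
theorem pv_loop_eq (cs : List Char) (res : List Int) (b : Bool) (k : Nat) :
    (cs.foldl pvStepA (res, b, 26 * (k : Int))).1
      = res ++ (pvTokB cs k).map (fun g => 26 * (g.1 : Int) + pvValB g.2) := by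
  induction cs generalizing res b k with
  | nil => simp [pvTokB]
  | cons c rest ih =>
    by_cases hz : c = 'z'
    · subst hz
      have h1 : pvStepA (res, b, 26 * (k : Int)) 'z' = (res, true, 26 * ((k + 1 : Nat) : Int)) := by
        simp [pvStepA]; ring
      simp only [List.foldl_cons, h1, pvTokB]
      exact ih res true (k + 1)
    · have hv : ((c.toNat : Int) - (if c = '_' then 96 else 97) + 1) = pvValB c := by
        by_cases h_ : c = '_'
        · subst h_; decide
        · simp [pvValB, h_]; ring
      cases k with
      | zero =>
        have h1 : pvStepA (res, b, 26 * ((0 : Nat) : Int)) c = (res ++ [pvValB c], false, 0) := by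
          simp [pvStepA, hz, hv]
        simp only [List.foldl_cons, h1, pvTokB, if_neg hz, List.map_cons]
        have := ih (res ++ [pvValB c]) false 0
        simpa using this
      | succ m =>
        have h1 : pvStepA (res, b, 26 * ((m + 1 : Nat) : Int)) c
            = (res ++ [26 * ((m + 1 : Nat) : Int) + pvValB c], false, 26 * ((0 : Nat) : Int)) := by
          simp [pvStepA, hz, hv]
        simp only [List.foldl_cons, h1, pvTokB, if_neg hz, List.map_cons]
        have := ih (res ++ [26 * ((m + 1 : Nat) : Int) + pvValB c]) false 0
        simpa using this

-- ===== VERDICT (by name: the statement is the Claim_ definition above) =====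
theorem convert_seq_to_numbers_spec : Claim_equal_convert_seq_to_numbers := by
  intro s _
  unfold Spec_convert_seq_to_numbers convert_seq_to_numbers convert_seq_to_numbers_alt
  have := pv_loop_eq s.toList [] false 0
  simpa using this
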